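-- pv_equiv track=rewrite | github.com/kavigupta/evallm | evallm/utils/kgrams.py | longest_terminal_repeated_kgrams
-- ===== SOURCE A (Python) =====
-- def longest_terminal_repeated_kgrams(s):
--     """
--     Get the longest repeated k-gram that satisfies the property s.endswith(kgram)
--     """
--     k = 1
--     indices = [i + 1 for i in range(len(s) - 1) if s[i] == s[-1]]
--     results = []
--     while True:
--         results.append((k, s[-k:], [i - k for i in indices]))
--         k += 1
--         new_indices = [i for i in indices if i - k >= 0 and s[i - k] == s[-k]]
--         if len(new_indices) < 1:
--             return results
--         indices = new_indices
-- ===== SOURCE B (Python) =====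
-- def longest_terminal_repeated_kgrams(s):
--     """
--     Get the longest repeated k-gram that satisfies the property s.endswith(kgram)
--     """
--     results = []
--     k = 1
--     while True:
--         positions = [p for p in range(len(s) - k) if s[p:p + k] == s[-k:]]
--         if not positions:
--             if not results:
--                 results.append((k, s[-k:], positions))
--             return results
--         results.append((k, s[-k:], positions))
--         k += 1
-- ===== Notes on version B (the rewrite author's own statement) =====
-- stated objective: simpler
-- what changed: A maintains a set of candidate end positions across iterations, filtering it incrementally one element at a time; B recomputes each level independently by a full rescan that compares each k-slice with the terminal k-gram directly, with no cross-iteration state.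
import Mathlib
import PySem

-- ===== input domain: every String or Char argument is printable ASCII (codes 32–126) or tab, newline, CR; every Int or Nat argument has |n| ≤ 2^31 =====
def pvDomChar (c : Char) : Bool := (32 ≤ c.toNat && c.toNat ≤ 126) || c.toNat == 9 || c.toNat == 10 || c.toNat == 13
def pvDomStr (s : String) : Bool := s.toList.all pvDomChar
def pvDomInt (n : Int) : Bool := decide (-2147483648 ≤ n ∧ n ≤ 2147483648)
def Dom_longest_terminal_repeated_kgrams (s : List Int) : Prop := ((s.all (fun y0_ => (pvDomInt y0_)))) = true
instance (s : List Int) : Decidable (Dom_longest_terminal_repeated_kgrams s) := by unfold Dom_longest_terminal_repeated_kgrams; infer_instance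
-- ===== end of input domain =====

-- B replaces A's incremental cross-iteration index filtering by an independent
-- full rescan of the whole list at each k (objective: simpler, not faster).

-- ===== PORT A =====
-- the while-loop of A; fuel only makes the recursion structural (never exhausted on real runs)
def pvALoop (s : List Int) : Nat → Int → List Int → List (Int × List Int × List Int) → List (Int × List Int × List Int)
  | 0, _, _, results => results
  | fuel + 1, k, indices, results =>
    let results := results ++ [(k, PySem.List.slice s (some (-k)) none, indices.map (fun i => i - k))]
    let k' := k + 1
    let newIndices := indices.filter (fun i =>
      decide (0 ≤ i - k') && decide (PySem.List.pyGetD s (i - k') 0 = PySem.List.pyGetD s (-k') 0))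
    if newIndices.length < 1 then results
    else pvALoop s fuel k' newIndices results

def longest_terminal_repeated_kgrams (s : List Int) : List (Int × List Int × List Int) :=
  let indices := ((PySem.List.pyRange 0 ((s.length : Int) - 1) 1).filter
      (fun i => decide (PySem.List.pyGetD s i 0 = PySem.List.pyGetD s (-1) 0))).map (fun i => i + 1)
  pvALoop s (s.length + 1) 1 indices []

-- ===== PORT B =====
-- the while-loop of B; fuel only makes the recursion structural (never exhausted on real runs)
def pvBLoop (s : List Int) : Nat → Int → List (Int × List Int × List Int) → List (Int × List Int × List Int)
  | 0, _, results => results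
  | fuel + 1, k, results =>
    let positions := (PySem.List.pyRange 0 ((s.length : Int) - k) 1).filter
      (fun p => decide (PySem.List.slice s (some p) (some (p + k)) = PySem.List.slice s (some (-k)) none))
    if positions.isEmpty then
      if results.isEmpty then results ++ [(k, PySem.List.slice s (some (-k)) none, positions)]
      else results
    else pvBLoop s fuel (k + 1) (results ++ [(k, PySem.List.slice s (some (-k)) none, positions)])

def longest_terminal_repeated_kgrams_alt (s : List Int) : List (Int × List Int × List Int) :=
  pvBLoop s (s.length + 1) 1 []

-- ===== PRECONDITION & SPEC =====
def Spec_longest_terminal_repeated_kgrams (s : List Int) (out : List (Int × List Int × List Int)) : Prop := out = longest_terminal_repeated_kgrams_alt s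
instance (s : List Int) (out : List (Int × List Int × List Int)) : Decidable (Spec_longest_terminal_repeated_kgrams s out) := by unfold Spec_longest_terminal_repeated_kgrams; infer_instance

-- ===== CLAIM (what is proved, stated in full; the proofs are below) =====
def Claim_equal_longest_terminal_repeated_kgrams : Prop := ∀ (s : List Int), Dom_longest_terminal_repeated_kgrams s → Spec_longest_terminal_repeated_kgrams s (longest_terminal_repeated_kgrams s)

-- ===== LEMMAS AND PROOFS =====

-- the invariant of A's loop: at level k, the live end positions j are exactly
-- those with k ≤ j < len whose k-gram ending at j equals the terminal k-gram
def pvInv (s : List Int) (k j : Int) : Bool :=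
  decide (k ≤ j) && decide (PySem.List.slice s (some (j - k)) (some j) = PySem.List.slice s (some (-k)) none)

def pvIdx (s : List Int) (k : Int) : List Int :=
  (PySem.List.pyRange 1 (s.length : Int) 1).filter (pvInv s k)

def pvPos (s : List Int) (k : Int) : List Int :=
  (PySem.List.pyRange 0 ((s.length : Int) - k) 1).filter
    (fun p => decide (PySem.List.slice s (some p) (some (p + k)) = PySem.List.slice s (some (-k)) none))

theorem pv_filter_map_comm {α β : Type} (f : α → β) (p : α → Bool) (q : β → Bool)
    (l : List α) (h : ∀ x ∈ l, q (f x) = p x) :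
    (l.filter p).map f = (l.map f).filter q := by
  induction l with
  | nil => simp
  | cons a l ih =>
    have ha := h a (by simp)
    have ih' := ih (fun x hx => h x (by simp [hx]))
    by_cases hp : p a = true
    · simp [hp, ha, ih']
    · simp at hp
      simp [hp, ha, ih']

theorem pv_map_pyRange_add (a b : Int) :
    (PySem.List.pyRange a b 1).map (fun x => x + 1) = PySem.List.pyRange (a + 1) (b + 1) 1 := by
  have h : b + 1 - (a + 1) = b - a := by ring
  simp only [PySem.List.pyRange_one, h, List.map_map]
  refine List.map_congr_left ?_
  intro x _
  simp only [Function.comp]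
  ring

theorem pv_map_pyRange_sub (a b k : Int) :
    (PySem.List.pyRange a b 1).map (fun x => x - k) = PySem.List.pyRange (a - k) (b - k) 1 := by
  have h : b - k - (a - k) = b - a := by ring
  simp only [PySem.List.pyRange_one, h, List.map_map]
  refine List.map_congr_left ?_
  intro x _
  simp only [Function.comp]
  ring

theorem pv_trim (a m : Int) (c : Int → Bool) (ha : a ≤ 0) :
    (PySem.List.pyRange a m 1).filter (fun p => decide (0 ≤ p) && c p)
      = (PySem.List.pyRange 0 m 1).filter c := by
  by_cases hm : 0 ≤ m
  · rw [PySem.List.pyRange_one_append a 0 m ha hm, List.filter_append]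
    have h1 : (PySem.List.pyRange a 0 1).filter (fun p => decide (0 ≤ p) && c p) = [] := by
      rw [List.filter_eq_nil_iff]
      intro p hp
      have := (PySem.List.mem_pyRange_one.mp hp).2
      simp [show ¬ (0 ≤ p) by omega]
    rw [h1, List.nil_append]
    refine List.filter_congr (fun p hp => ?_)
    have := (PySem.List.mem_pyRange_one.mp hp).1
    simp [this]
  · have h0 : PySem.List.pyRange 0 m 1 = [] := PySem.List.pyRange_one_eq_nil (by omega)
    rw [h0]
    simp only [List.filter_nil]
    rw [List.filter_eq_nil_iff]
    intro p hp
    have := (PySem.List.mem_pyRange_one.mp hp).2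
    simp [show ¬ (0 ≤ p) by omega]

-- the terminal k-gram is a plain drop
theorem pv_tailk (s : List Int) (k : Int) (hk : 1 ≤ k) :
    PySem.List.slice s (some (-k)) none = s.drop (s.length - k.toNat) := by
  obtain ⟨m, rfl⟩ : ∃ m : Nat, k = (m : Int) := ⟨k.toNat, by omega⟩
  rw [PySem.List.slice_from_neg_natCast _ _ (by omega)]
  simp

-- slices of in-range nonneg bounds
theorem pv_slice_nn (s : List Int) (a b : Int) (h0 : 0 ≤ a) (hab : a ≤ b) :
    PySem.List.slice s (some a) (some b) = (s.drop a.toNat).take (b.toNat - a.toNat) :=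
  PySem.List.slice_toNat s h0 (by omega)

-- core pointwise step: extending the match by one position on the left
theorem pv_inv_step (s : List Int) (k j : Int) (hk : 1 ≤ k) (hj1 : 1 ≤ j) (hjL : j < (s.length : Int)) :
    pvInv s (k + 1) j
      = (pvInv s k j && (decide (0 ≤ j - (k + 1)) && decide (PySem.List.pyGetD s (j - (k + 1)) 0 = PySem.List.pyGetD s (-(k + 1)) 0))) := by
  unfold pvInv
  by_cases h : k + 1 ≤ j
  · obtain ⟨m, rfl⟩ : ∃ m : Nat, k = (m : Int) := ⟨k.toNat, by omega⟩
    obtain ⟨q, rfl⟩ : ∃ q : Nat, j = (q : Int) := ⟨j.toNat, by omega⟩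
    have hm1 : 1 ≤ m := by omega
    have hmq : m + 1 ≤ q := by omega
    have hqn : q < s.length := by omega
    rw [pv_slice_nn s ((q : Int) - ((m : Int) + 1)) (q : Int) (by omega) (by omega),
        pv_slice_nn s ((q : Int) - (m : Int)) (q : Int) (by omega) (by omega),
        pv_tailk s ((m : Int) + 1) (by omega), pv_tailk s (m : Int) (by omega),
        PySem.List.pyGetD_eq_getElem s 0 (show (0 : Int) ≤ (q : Int) - ((m : Int) + 1) by omega) (by omega)]
    rw [show (-((m : Int) + 1)) = -(((m + 1 : Nat) : Int)) by push_cast; ring,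
        PySem.List.pyGetD_neg_natCast s (m + 1) 0 (by omega) (by omega)]
    simp only [show ((q : Int) - ((m : Int) + 1)).toNat = q - (m + 1) from by omega,
        show ((q : Int) - (m : Int)).toNat = q - m from by omega,
        show ((m : Int) + 1).toNat = m + 1 from by omega,
        show ((m : Int)).toNat = m from by omega,
        show ((q : Int)).toNat = q from by omega,
        show q - (q - (m + 1)) = m + 1 from by omega,
        show q - (q - m) = m from by omega]
    rw [List.drop_eq_getElem_cons (show q - (m + 1) < s.length by omega)]
    rw [List.drop_eq_getElem_cons (show s.length - (m + 1) < s.length by omega)]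
    rw [show q - (m + 1) + 1 = q - m by omega, show s.length - (m + 1) + 1 = s.length - m by omega,
        List.take_succ_cons]
    simp only [List.cons.injEq, Bool.decide_and,
        show ((m : Int) + 1 ≤ (q : Int)) by omega, show ((m : Int) ≤ (q : Int)) by omega,
        show ((0 : Int) ≤ (q : Int) - ((m : Int) + 1)) by omega, decide_true, Bool.true_and]
    rw [Bool.and_comm]
  · simp [h]

-- initial indices of A = pvIdx at level 1
theorem pv_idx_init (s : List Int) :
    ((PySem.List.pyRange 0 ((s.length : Int) - 1) 1).filter
      (fun i => decide (PySem.List.pyGetD s i 0 = PySem.List.pyGetD s (-1) 0))).map (fun i => i + 1)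
      = pvIdx s 1 := by
  unfold pvIdx
  rw [pv_filter_map_comm (fun i => i + 1) _ (pvInv s 1)]
  · rw [pv_map_pyRange_add, show (s.length : Int) - 1 + 1 = (s.length : Int) by ring,
        show (0 : Int) + 1 = 1 by ring]
  · intro i hi
    obtain ⟨hi0, hi1⟩ := PySem.List.mem_pyRange_one.mp hi
    obtain ⟨q, rfl⟩ : ∃ q : Nat, i = (q : Int) := ⟨i.toNat, by omega⟩
    have hqn : q + 1 ≤ s.length := by omega
    unfold pvInv
    rw [show ((q : Int) + 1 - 1) = (q : Int) by ring]
    rw [pv_slice_nn s (q : Int) ((q : Int) + 1) (by omega) (by omega),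
        pv_tailk s 1 (by omega)]
    simp only [show ((q : Int) + 1).toNat = q + 1 from by omega,
        show ((q : Int)).toNat = q from by omega,
        show (1 : Int).toNat = 1 from by omega,
        show q + 1 - q = 1 from by omega]
    rw [List.drop_eq_getElem_cons (show q < s.length by omega)]
    rw [List.drop_eq_getElem_cons (show s.length - 1 < s.length by omega)]
    rw [show s.length - 1 + 1 = s.length by omega, List.drop_length, List.take_succ_cons,
        List.take_zero]
    rw [PySem.List.pyGetD_eq_getElem s 0 (show (0 : Int) ≤ (q : Int) by omega) (by omega),
        show (-1 : Int) = -(((1 : Nat)) : Int) by norm_num,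
        PySem.List.pyGetD_neg_natCast s 1 0 (by omega) (by omega)]
    simp only [show ((q : Int)).toNat = q from by omega]
    simp [show (1 : Int) ≤ (q : Int) + 1 by omega]

-- A's per-step filter carries the invariant to the next level
theorem pv_idx_step (s : List Int) (k : Int) (hk : 1 ≤ k) :
    (pvIdx s k).filter (fun i =>
      decide (0 ≤ i - (k + 1)) && decide (PySem.List.pyGetD s (i - (k + 1)) 0 = PySem.List.pyGetD s (-(k + 1)) 0))
      = pvIdx s (k + 1) := by
  unfold pvIdx
  rw [List.filter_filter]
  refine List.filter_congr ?_
  intro j hj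
  obtain ⟨hj1, hjL⟩ := PySem.List.mem_pyRange_one.mp hj
  rw [pv_inv_step s k j hk hj1 hjL, Bool.and_comm]

-- B's rescan positions are A's indices shifted by k
theorem pv_pos_eq (s : List Int) (k : Int) (hk : 1 ≤ k) :
    (pvIdx s k).map (fun i => i - k) = pvPos s k := by
  unfold pvIdx pvPos
  rw [pv_filter_map_comm (fun i => i - k) _ (fun p => pvInv s k (p + k))
      _ (fun x _ => by show pvInv s k (x - k + k) = pvInv s k x; rw [show x - k + k = x by ring])]
  rw [pv_map_pyRange_sub]
  have hpt : ∀ p : Int, pvInv s k (p + k)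
      = (decide (0 ≤ p) && decide (PySem.List.slice s (some p) (some (p + k)) = PySem.List.slice s (some (-k)) none)) := by
    intro p
    unfold pvInv
    rw [show p + k - k = p by ring]
    congr 1
    rw [decide_eq_decide]
    omega
  simp only [hpt]
  exact pv_trim (1 - k) ((s.length : Int) - k) _ (by omega)

theorem pv_idx_le (s : List Int) (k : Int) (h : pvIdx s k ≠ []) : k ≤ (s.length : Int) - 1 := by
  obtain ⟨j, hj⟩ := List.exists_mem_of_ne_nil _ h
  rw [pvIdx, List.mem_filter] at hj
  obtain ⟨hjr, hjp⟩ := hj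
  have hjL := (PySem.List.mem_pyRange_one.mp hjr).2
  rw [pvInv, Bool.and_eq_true, decide_eq_true_eq] at hjp
  omega

theorem pv_loops_eq (s : List Int) : ∀ (fuel : Nat) (k : Int) (res : List (Int × List Int × List Int)),
    1 ≤ k → (k = 1 ∨ pvIdx s k ≠ []) → (res = [] ↔ k = 1) →
    ((s.length : Int) - k).toNat + 1 ≤ fuel →
    pvALoop s fuel k (pvIdx s k) res = pvBLoop s fuel k res := by
  intro fuel
  induction fuel with
  | zero => intro k res _ _ _ hf; omega
  | succ fuel ih =>
    intro k res hk hk2 hres hf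
    simp only [pvALoop, pvBLoop]
    rw [pv_idx_step s k hk]
    have hpos := pv_pos_eq s k hk
    rw [show (List.filter (fun p => decide (PySem.List.slice s (some p) (some (p + k)) = PySem.List.slice s (some (-k)) none)) (PySem.List.pyRange 0 ((s.length : Int) - k) 1)) = pvPos s k from rfl]
    by_cases hempty : pvIdx s k = []
    · -- level k has no occurrences: A appends the (empty) level and stops; B's rescan is empty
      have hk1 : k = 1 := by
        rcases hk2 with h1 | h1
        · exact h1
        · exact absurd hempty h1
      have hres' : res = [] := hres.mpr hk1
      have hpos' : pvPos s k = [] := by rw [← hpos, hempty, List.map_nil]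
      have hstep : pvIdx s (k + 1) = [] := by
        rw [← pv_idx_step s k hk, hempty, List.filter_nil]
      rw [hstep, hempty, hpos']
      simp [hres']
    · -- level k is non-empty
      have hkL : k ≤ (s.length : Int) - 1 := pv_idx_le s k hempty
      have hposne : pvPos s k ≠ [] := by
        rw [← hpos]
        simpa using hempty
      rw [← hpos]
      by_cases h2 : pvIdx s (k + 1) = []
      · -- next level dies: A stops now, B stops on its next iteration
        rw [if_pos (by simp [h2] : (pvIdx s (k + 1)).length < 1),
            if_neg (by simp [hempty] : ¬ (((pvIdx s k).map (fun i => i - k)).isEmpty = true))]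
        obtain ⟨f, rfl⟩ : ∃ f, fuel = f + 1 := ⟨fuel - 1, by omega⟩
        simp only [pvBLoop]
        have hp1 : pvPos s (k + 1) = [] := by
          rw [← pv_pos_eq s (k + 1) (by omega), h2, List.map_nil]
        rw [show (List.filter (fun p => decide (PySem.List.slice s (some p) (some (p + (k + 1))) = PySem.List.slice s (some (-(k + 1))) none)) (PySem.List.pyRange 0 ((s.length : Int) - (k + 1)) 1)) = pvPos s (k + 1) from rfl, hp1]
        simp
      · -- both loops continue at level k+1
        rw [if_neg (by simp [h2] : ¬ ((pvIdx s (k + 1)).length < 1)),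
            if_neg (by simp [hempty] : ¬ (((pvIdx s k).map (fun i => i - k)).isEmpty = true))]
        have hkL2 : k + 1 ≤ (s.length : Int) - 1 := pv_idx_le s (k + 1) h2
        exact ih (k + 1) (res ++ [(k, PySem.List.slice s (some (-k)) none, (pvIdx s k).map (fun i => i - k))])
          (by omega) (Or.inr h2) (by simp; omega) (by omega)

-- ===== VERDICT (by name: the statement is the Claim_ definition above) =====
theorem longest_terminal_repeated_kgrams_spec : Claim_equal_longest_terminal_repeated_kgrams := by
  intro s _
  unfold Spec_longest_terminal_repeated_kgrams longest_terminal_repeated_kgrams longest_terminal_repeated_kgrams_alt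
  rw [pv_idx_init s]
  exact pv_loops_eq s (s.length + 1) 1 [] le_rfl (Or.inl rfl) (by simp) (by omega)
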